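-- pv_equiv track=rewrite | github.com/rudneff13/python-course-alphabet | base_types_exceptions_loops/homework.py | remove_from_list_all_negative_numbers
-- ===== SOURCE A (Python) =====
-- from typing import List
--
-- def remove_from_list_all_negative_numbers(data: List[int]) -> list:
--     """
--     Use loops to solve this task.
--     You could use data.remove(negative_number) to solve this issue.
--     Also you could create new list with only positive numbers.
--     Examples:
--         remove_from_list_all_negative_numbers([1, 5, -7, 8, -1])
--         >>> [1, 5, 8]
--     """
--     # new_list = []
--     # for value in data:
--     #     if value >=0:
--     #         new_list.append(value)
--     #     else:
--     #         pass
--     # return new_list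
--
--     i = 0
--     while i < len(data):
--         if data[i] >= 0:
--             i += 1
--         else:
--             data.remove(data[i])
--     return data
-- ===== SOURCE B (Python) =====
-- from typing import List
--
-- def remove_from_list_all_negative_numbers(data: List[int]) -> list:
--     # One forward pass building a new list (A mutates `data` in place; return value is identical).
--     return [value for value in data if value >= 0]
-- ===== Notes on version B (the rewrite author's own statement) =====
-- stated objective: faster
-- what changed: Replaces the quadratic while-loop that repeatedly calls data.remove on each negative element with a single-pass list comprehension building a new list (A mutates the argument in place; B does not - the proved equivalence is about the return value).
import Mathlib
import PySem

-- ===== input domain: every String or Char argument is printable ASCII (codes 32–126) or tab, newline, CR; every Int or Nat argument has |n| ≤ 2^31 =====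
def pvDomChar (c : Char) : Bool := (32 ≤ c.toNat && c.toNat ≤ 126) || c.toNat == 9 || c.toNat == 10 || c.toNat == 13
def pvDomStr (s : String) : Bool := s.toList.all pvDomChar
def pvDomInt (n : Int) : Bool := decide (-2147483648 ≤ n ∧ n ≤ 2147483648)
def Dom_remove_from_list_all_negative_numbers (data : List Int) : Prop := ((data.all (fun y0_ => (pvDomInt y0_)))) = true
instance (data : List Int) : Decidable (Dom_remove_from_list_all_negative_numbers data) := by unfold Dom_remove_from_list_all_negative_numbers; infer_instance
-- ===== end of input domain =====

-- B replaces A's quadratic repeated data.remove with a single-pass comprehension building a new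
-- list; A mutates `data` in place, B does not — the equivalence proved here is about the RETURN value.

-- ===== PORT A =====
-- the while loop: i advances past nonnegatives; data.remove(data[i]) deletes the first occurrence
def pvLoopA (data : List Int) (i : Nat) : List Int :=
  if h : i < data.length then
    if 0 ≤ data[i] then pvLoopA data (i + 1)
    else
      match hr : PySem.List.remove? data data[i] with
      | some d => pvLoopA d i
      | none => data  -- unreachable: data[i] ∈ data
  else data
termination_by data.length - i
decreasing_by
  · omega
  · have hm : data[i] ∈ data := List.getElem_mem h
    rw [PySem.List.remove?_eq_some_erase data _ hm] at hr
    have := List.length_erase_of_mem hm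
    cases hr
    omega

def remove_from_list_all_negative_numbers (data : List Int) : List Int :=
  pvLoopA data 0

-- ===== PORT B =====
-- [value for value in data if value >= 0]
def remove_from_list_all_negative_numbers_alt (data : List Int) : List Int :=
  data.foldl (fun acc value => if 0 ≤ value then acc ++ [value] else acc) []

-- ===== PRECONDITION & SPEC =====
def Spec_remove_from_list_all_negative_numbers (data : List Int) (out : List Int) : Prop := out = remove_from_list_all_negative_numbers_alt data
instance (data : List Int) (out : List Int) : Decidable (Spec_remove_from_list_all_negative_numbers data out) := by unfold Spec_remove_from_list_all_negative_numbers; infer_instance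

-- ===== CLAIM (what is proved, stated in full; the proofs are below) =====
def Claim_equal_remove_from_list_all_negative_numbers : Prop := ∀ (data : List Int), Dom_remove_from_list_all_negative_numbers data → Spec_remove_from_list_all_negative_numbers data (remove_from_list_all_negative_numbers data)

-- ===== LEMMAS AND PROOFS =====

-- invariant of A's while loop: the kept prefix is all nonnegative, and the result is that
-- prefix followed by the filtered suffix
lemma pvLoopA_eq (data : List Int) (i : Nat) (hpre : ∀ x ∈ data.take i, 0 ≤ x) :
    pvLoopA data i = data.take i ++ (data.drop i).filter (fun v => 0 ≤ v) := by
  induction data, i using pvLoopA.induct with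
  | case1 data i h hge ih =>
    rw [pvLoopA, dif_pos h, if_pos hge]
    rw [ih ?_]
    · conv_rhs => rw [List.drop_eq_getElem_cons h, List.filter_cons]
      rw [List.take_add_one, List.getElem?_eq_getElem h, Option.toList_some,
        List.append_assoc, List.singleton_append]
      simp [hge]
    · intro x hx
      rw [List.take_add_one] at hx
      simp only [List.mem_append, List.getElem?_eq_getElem h] at hx
      rcases hx with hx | hx
      · exact hpre x hx
      · simp at hx; omega
  | case2 data i h hge d hr ih =>
    have hm : data[i] ∈ data := List.getElem_mem h
    have hne : data[i] ∉ data.take i := fun hx => hge (hpre _ hx)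
    have he := PySem.List.remove?_eq_some_erase data _ hm
    rw [hr] at he
    injection he with he
    have hsplit : data = data.take i ++ data[i] :: data.drop (i + 1) := by
      conv_lhs => rw [← List.take_append_drop i data]
      rw [List.drop_eq_getElem_cons h]
    have hd : d = data.take i ++ data.drop (i + 1) := by
      rw [he]
      generalize data[i] = v at hne hsplit ⊢
      conv_lhs => rw [hsplit]
      rw [List.erase_append_right _ hne, List.erase_cons_head]
    have hlen : (data.take i).length = i := List.length_take_of_le (le_of_lt h)
    have htk : d.take i = data.take i := by
      rw [hd, List.take_append_of_le_length (by omega), List.take_take]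
      simp
    have hdp : d.drop i = data.drop (i + 1) := by
      rw [hd, List.drop_append_of_le_length (by omega)]
      simp
    rw [pvLoopA, dif_pos h, if_neg hge]
    split
    next d1 heq =>
      rw [hr] at heq
      injection heq with heq
      subst heq
      rw [ih (by rw [htk]; exact hpre), htk, hdp]
      conv_rhs => rw [List.drop_eq_getElem_cons h, List.filter_cons]
      simp [hge]
    next heq =>
      rw [hr] at heq
      cases heq
  | case3 data i h hge hr =>
    exact absurd (List.getElem_mem h) ((PySem.List.remove?_eq_none_iff data data[i]).mp hr)
  | case4 data i h =>
    have hle : data.length ≤ i := by omega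
    rw [pvLoopA, dif_neg h]
    simp [List.take_of_length_le hle, List.drop_of_length_le hle]

-- ===== VERDICT (by name: the statement is the Claim_ definition above) =====
theorem remove_from_list_all_negative_numbers_spec : Claim_equal_remove_from_list_all_negative_numbers := by
  intro data _
  show _ = _
  rw [remove_from_list_all_negative_numbers, pvLoopA_eq data 0 (by simp),
    remove_from_list_all_negative_numbers_alt, PySem.List.foldl_append_ite_eq_filter (fun v => (0:Int) ≤ v)]
  simp
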